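-- pv_equiv track=rewrite | github.com/grimalPaul/gsn-factory | src/models/utils.py | get_object_list
-- ===== SOURCE A (Python) =====
-- def get_object_list(params):
--     list_objects = []
--     color_objects = []
--
--     for k, v in params.get("labels_params", {}).items():
--         if k.startswith("object") or k.startswith("entity"):
--             while len(list_objects) < len(v):
--                 list_objects.append([])
--             for i, v_ in enumerate(v):
--                 list_objects[i].append(v_)
--
--     for k, v in params.get("adjs_params", {}).items():
--         if k.startswith("adj"):
--             while len(color_objects) < len(v):
--                 color_objects.append([])
--             for i, v_ in enumerate(v):
--                 color_objects[i].append(v_)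
--
--     return list_objects, color_objects
-- ===== SOURCE B (Python) =====
-- def _transpose(d, prefixes):
--     cols = [v for k, v in d.items() if k.startswith(prefixes)]
--     maxlen = max((len(v) for v in cols), default=0)
--     return [[col[i] for col in cols if i < len(col)] for i in range(maxlen)]
--
--
-- def get_object_list(params):
--     return (
--         _transpose(params.get("labels_params", {}), ("object", "entity")),
--         _transpose(params.get("adjs_params", {}), ("adj",)),
--     )
-- ===== Notes on version B (the rewrite author's own statement) =====
-- stated objective: simpler
-- what changed: A transposes column-by-column, lazily growing the row list with a while-loop and appending each element into its row in place; B first collects the matching columns, computes maxlen once, and builds each output row directly with a comprehension over range(maxlen).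
import Mathlib
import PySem

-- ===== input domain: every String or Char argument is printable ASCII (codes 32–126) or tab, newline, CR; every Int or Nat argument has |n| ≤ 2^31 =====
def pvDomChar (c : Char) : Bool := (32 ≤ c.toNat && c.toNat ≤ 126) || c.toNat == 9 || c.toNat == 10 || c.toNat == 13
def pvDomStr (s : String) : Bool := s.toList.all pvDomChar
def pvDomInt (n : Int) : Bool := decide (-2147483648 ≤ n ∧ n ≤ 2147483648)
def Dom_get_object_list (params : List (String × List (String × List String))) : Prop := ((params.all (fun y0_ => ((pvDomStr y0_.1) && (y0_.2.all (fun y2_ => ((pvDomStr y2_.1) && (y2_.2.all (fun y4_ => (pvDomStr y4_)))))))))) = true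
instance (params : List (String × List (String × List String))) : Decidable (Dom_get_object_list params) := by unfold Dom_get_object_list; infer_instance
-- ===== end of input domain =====

-- B differs from A by decomposition: A transposes column-by-column, growing rows lazily and
-- appending into them; B collects the matching columns, then builds each output row directly
-- by a comprehension over range(maxlen). Same cost; objective: simpler.

-- ===== PORT A =====
-- params.get(k, {}) on the outer dict (first match in the association list)
def pvGetSec (params : List (String × List (String × List String))) (k : String) :
    List (String × List String) :=
  ((params.find? (fun kv => kv.1 == k)).map (·.2)).getD []

-- 'while len(rows) < n: rows.append([])'
def growWhile (rows : List (List String)) (n : Nat) : List (List String) :=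
  if rows.length < n then growWhile (rows ++ [[]]) n else rows
termination_by n - rows.length
decreasing_by simp; omega

-- 'for i, v_ in enumerate(v): rows[i].append(v_)'
def fillCol (rows : List (List String)) (v : List String) : List (List String) :=
  (PySem.List.enumerate v).foldl
    (fun r iv => r.set iv.1.toNat (r.getD iv.1.toNat [] ++ [iv.2])) rows

def get_object_list (params : List (String × List (String × List String))) :
    List (List String) × List (List String) :=
  let list_objects := (pvGetSec params "labels_params").foldl
    (fun rows kv =>
      if PySem.Str.startswith kv.1 "object" || PySem.Str.startswith kv.1 "entity" then
        fillCol (growWhile rows kv.2.length) kv.2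
      else rows) []
  let color_objects := (pvGetSec params "adjs_params").foldl
    (fun rows kv =>
      if PySem.Str.startswith kv.1 "adj" then
        fillCol (growWhile rows kv.2.length) kv.2
      else rows) []
  (list_objects, color_objects)

-- ===== PORT B =====
-- _transpose(d, prefixes): cols, maxlen, then one comprehension per output row
def transposeAlt (d : List (String × List String)) (p : String → Bool) :
    List (List String) :=
  let cols := (d.filter (fun kv => p kv.1)).map (·.2)
  let maxlen := cols.foldl (fun m c => max m c.length) 0
  (List.range maxlen).map
    (fun i => (cols.filter (fun c => decide (i < c.length))).map (fun c => c.getD i ""))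

def get_object_list_alt (params : List (String × List (String × List String))) :
    List (List String) × List (List String) :=
  (transposeAlt (pvGetSec params "labels_params")
     (fun k => PySem.Str.startswith k "object" || PySem.Str.startswith k "entity"),
   transposeAlt (pvGetSec params "adjs_params")
     (fun k => PySem.Str.startswith k "adj"))

-- ===== PRECONDITION & SPEC =====
def Spec_get_object_list (params : List (String × List (String × List String))) (out : List (List String) × List (List String)) : Prop := out = get_object_list_alt params
instance (params : List (String × List (String × List String))) (out : List (List String) × List (List String)) : Decidable (Spec_get_object_list params out) := by unfold Spec_get_object_list; infer_instance

-- ===== CLAIM (what is proved, stated in full; the proofs are below) =====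
def Claim_equal_get_object_list : Prop := ∀ (params : List (String × List (String × List String))), Dom_get_object_list params → Spec_get_object_list params (get_object_list params)

-- ===== LEMMAS AND PROOFS =====

def addCol (rows : List (List String)) (c : List String) : List (List String) :=
  fillCol (growWhile rows c.length) c

def maxLenL (cols : List (List String)) : Nat :=
  cols.foldl (fun m c => max m c.length) 0

def colsAt (cols : List (List String)) (i : Nat) : List String :=
  (cols.filter (fun c => decide (i < c.length))).map (fun c => c.getD i "")

theorem growWhile_eq (rows : List (List String)) (n : Nat) :
    growWhile rows n = rows ++ List.replicate (n - rows.length) [] := by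
  fun_induction growWhile rows n with
  | case1 rows h ih =>
      rw [ih, List.append_assoc]
      congr 1
      have h2 : n - rows.length = (n - (rows ++ [([] : List String)]).length) + 1 := by
        simp; omega
      rw [h2, List.replicate_succ]
      simp
  | case2 rows h =>
      have : n - rows.length = 0 := by omega
      simp [this]

theorem getD_set (l : List (List String)) (n i : Nat) (a : List String) :
    (l.set n a).getD i [] = if n = i ∧ n < l.length then a else l.getD i [] := by
  by_cases h1 : n = i
  · subst h1
    by_cases h2 : n < l.length
    · simp [List.getD_eq_getElem?_getD, h2]
    · have h3 : l[n]? = none := by rw [List.getElem?_eq_none_iff]; omega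
      simp [List.getD_eq_getElem?_getD, h2]
  · simp [List.getD_eq_getElem?_getD, h1]

theorem fill_len (v : List String) : ∀ (s : Nat) (rows : List (List String)),
    ((PySem.List.enumerate v (s : Int)).foldl
      (fun r iv => r.set iv.1.toNat (r.getD iv.1.toNat [] ++ [iv.2])) rows).length
      = rows.length := by
  induction v with
  | nil => intro s rows; simp [PySem.List.enumerate_nil]
  | cons x xs ih =>
      intro s rows
      rw [PySem.List.enumerate_cons]
      have hc : ((s : Int) + 1) = ((s + 1 : Nat) : Int) := by push_cast; ring
      simp only [List.foldl_cons, hc, ih]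
      simp

theorem fill_getD (i : Nat) (v : List String) : ∀ (s : Nat) (rows : List (List String)),
    s + v.length ≤ rows.length →
    ((PySem.List.enumerate v (s : Int)).foldl
      (fun r iv => r.set iv.1.toNat (r.getD iv.1.toNat [] ++ [iv.2])) rows).getD i []
      = rows.getD i [] ++ (if s ≤ i ∧ i < s + v.length then [v.getD (i - s) ""] else []) := by
  induction v with
  | nil =>
      intro s rows _
      rw [PySem.List.enumerate_nil]
      simp only [List.foldl_nil]
      have h : ¬ (s ≤ i ∧ i < s + List.length ([] : List String)) := by simp
      rw [if_neg h, List.append_nil]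
  | cons x xs ih =>
      intro s rows hlen
      rw [PySem.List.enumerate_cons]
      have hc : ((s : Int) + 1) = ((s + 1 : Nat) : Int) := by push_cast; ring
      simp only [List.foldl_cons, hc]
      have htn : ((s : Int)).toNat = s := by omega
      rw [htn]
      set rows' := rows.set s (rows.getD s [] ++ [x]) with hrows'
      have hlen' : (s + 1) + xs.length ≤ rows'.length := by
        simp [hrows']; simp at hlen; omega
      rw [ih (s + 1) rows' hlen']
      rw [hrows', getD_set]
      by_cases hi : s = i
      · subst hi
        have h1 : s < rows.length := by simp at hlen; omega
        have h2 : ¬ (s + 1 ≤ s ∧ s < s + 1 + xs.length) := by omega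
        have h3 : s ≤ s ∧ s < s + (x :: xs).length := by simp
        rw [if_pos ⟨rfl, h1⟩, if_neg h2, if_pos h3]
        simp
      · have h1 : ¬ (s = i ∧ s < rows.length) := by
          intro h; exact hi h.1
        rw [if_neg h1]
        by_cases h2 : s + 1 ≤ i ∧ i < s + 1 + xs.length
        · have h3 : s ≤ i ∧ i < s + (x :: xs).length := by
            exact ⟨by omega, by simp; omega⟩
          rw [if_pos h2, if_pos h3]
          have h4 : i - s = (i - (s + 1)) + 1 := by omega
          rw [h4]
          simp
        · have h3 : ¬ (s ≤ i ∧ i < s + (x :: xs).length) := by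
            simp only [List.length_cons]; omega
          rw [if_neg h2, if_neg h3]
  
theorem addCol_len (rows : List (List String)) (c : List String) :
    (addCol rows c).length = max rows.length c.length := by
  unfold addCol fillCol
  have h := fill_len c 0 (growWhile rows c.length)
  rw [Nat.cast_zero] at h
  rw [h, growWhile_eq]
  simp; omega

theorem grow_getD (rows : List (List String)) (n i : Nat) :
    (rows ++ List.replicate (n - rows.length) ([] : List String)).getD i [] = rows.getD i [] := by
  simp only [List.getD_eq_getElem?_getD, List.getElem?_append]
  split_ifs with h
  · rfl
  · rw [List.getElem?_replicate]
    have h2 : rows[i]? = none := by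
      rw [List.getElem?_eq_none_iff]; omega
    rw [h2]
    split_ifs <;> rfl

theorem addCol_getD (rows : List (List String)) (c : List String) (i : Nat) :
    (addCol rows c).getD i []
      = rows.getD i [] ++ (if i < c.length then [c.getD i ""] else []) := by
  unfold addCol fillCol
  have hlen : 0 + c.length ≤ (growWhile rows c.length).length := by
    rw [growWhile_eq]; simp; omega
  have h := fill_getD i c 0 (growWhile rows c.length) hlen
  rw [Nat.cast_zero] at h
  rw [h, growWhile_eq, grow_getD]
  congr 1
  simp

theorem maxLenL_cons (c : List String) (cols : List (List String)) :
    maxLenL (c :: cols) = max c.length (maxLenL cols) := by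
  have key : ∀ (cols : List (List String)) (a b : Nat),
      cols.foldl (fun m c => max m c.length) (max a b)
        = max a (cols.foldl (fun m c => max m c.length) b) := by
    intro cols
    induction cols with
    | nil => intro a b; rfl
    | cons d ds ih =>
        intro a b
        simp only [List.foldl_cons]
        rw [Nat.max_assoc, ih]
  unfold maxLenL
  simp only [List.foldl_cons]
  have : max 0 c.length = max c.length 0 := by omega
  rw [this, key]

theorem colsAt_cons (c : List String) (cols : List (List String)) (i : Nat) :
    colsAt (c :: cols) i
      = (if i < c.length then [c.getD i ""] else []) ++ colsAt cols i := by
  unfold colsAt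
  rw [List.filter_cons]
  by_cases h : i < c.length
  · simp [h]
  · simp [h]

theorem foldl_addCol (cols : List (List String)) : ∀ (rows : List (List String)),
    cols.foldl addCol rows
      = (List.range (max rows.length (maxLenL cols))).map
          (fun i => rows.getD i [] ++ colsAt cols i) := by
  induction cols with
  | nil =>
      intro rows
      have h1 : max rows.length (maxLenL []) = rows.length := by
        unfold maxLenL; simp
      rw [List.foldl_nil, h1]
      apply List.ext_getElem
      · simp
      · intro i h1 h2
        simp [colsAt, List.getD_eq_getElem?_getD]
        simp at h1
        simp [List.getElem?_eq_getElem h1]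
  | cons c cols ih =>
      intro rows
      rw [List.foldl_cons, ih]
      have hr : max (addCol rows c).length (maxLenL cols)
          = max rows.length (maxLenL (c :: cols)) := by
        rw [addCol_len, maxLenL_cons]; omega
      rw [hr]
      apply List.map_congr_left
      intro i _
      rw [addCol_getD, colsAt_cons, List.append_assoc]

theorem foldl_if_eq_foldl_cols (d : List (String × List String)) (p : String → Bool) :
    ∀ (rows : List (List String)),
    d.foldl (fun rows kv => if p kv.1 then addCol rows kv.2 else rows) rows
      = ((d.filter (fun kv => p kv.1)).map (·.2)).foldl addCol rows := by
  induction d with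
  | nil => intro rows; rfl
  | cons kv d ih =>
      intro rows
      rw [List.foldl_cons, List.filter_cons]
      split_ifs with h
      · simp only [List.map_cons, List.foldl_cons]
        exact ih _
      · exact ih rows

theorem transpose_eq (d : List (String × List String)) (p : String → Bool) :
    d.foldl (fun rows kv => if p kv.1 then addCol rows kv.2 else rows) []
      = transposeAlt d p := by
  rw [foldl_if_eq_foldl_cols, foldl_addCol]
  unfold transposeAlt
  simp only [List.length_nil, Nat.max_eq_right (Nat.zero_le _), List.getD_nil]
  rfl

theorem transpose_eq_unfolded (d : List (String × List String)) (p : String → Bool) :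
    d.foldl (fun rows kv =>
        if p kv.1 then fillCol (growWhile rows kv.2.length) kv.2 else rows) []
      = transposeAlt d p := by
  have h := transpose_eq d p
  simp only [addCol] at h
  exact h

-- ===== VERDICT (by name: the statement is the Claim_ definition above) =====
theorem get_object_list_spec : Claim_equal_get_object_list := by
  intro params _
  unfold Spec_get_object_list get_object_list get_object_list_alt
  refine Prod.ext ?_ ?_ <;> dsimp only
  · exact transpose_eq_unfolded _
      (fun k => PySem.Str.startswith k "object" || PySem.Str.startswith k "entity")
  · exact transpose_eq_unfolded _ (fun k => PySem.Str.startswith k "adj")
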